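-- pv_equiv track=rewrite | github.com/ZckFreedom/Mathworks | db_sqence/easy_db.py | shift_order_alg_A
-- ===== SOURCE A (Python) =====
-- def shift_order_first0(s_sequence):
-- 	size = len(s_sequence)
-- 	s_sequence += s_sequence
--
-- 	real_states = Shift_order_space()
-- 	for i in range(size, -1, -1):
-- 		if real_states.if_not_in(s_sequence[i:i+size]) and s_sequence[i] == 0:
-- 			real_states.apend((s_sequence[i:i + size]))
--
-- 	real_states.select_sort()
-- 	return real_states.get_number(), real_states.len()
--
-- class Shift_order_space:
-- 	def __init__(self):
-- 		self._shiftlist = []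
-- 		self._shiftnumber = 0
--
-- 	def get_number(self):
-- 		return self._shiftlist[-1][1]
--
-- 	def len(self):
-- 		return len(self._shiftlist)
--
-- 	def apend(self, a_list):
-- 		self._shiftlist.append((a_list, self._shiftnumber))
-- 		self._shiftnumber += 1
--
-- 	def if_not_in(self, a_list):
-- 		if len(self._shiftlist) == 0:
-- 			return True
-- 		for i in range(0, len(self._shiftlist)):
-- 			if self._shiftlist[i][0] == a_list:
-- 				return False
-- 		return True
--
-- 	def select_sort(self):
-- 		resort = self._shiftlist
-- 		for i in range(0, len(resort) - 1):
-- 			k = i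
-- 			for j in range(i, len(resort)):
-- 				if resort[k][0] < resort[j][0]:
-- 					k = j
-- 			if i != k:
-- 				resort[i], resort[k] = resort[k], resort[i]
--
-- def shift_order_alg_A(s_sequence):
-- 	state = None
-- 	retval = []
--
-- 	while state != s_sequence:
-- 		if state is None:
-- 			state = s_sequence[:]
--
-- 		k, m = shift_order_first0([0] + state[1:])
-- 		if (m % 2 == 1 and k == 0) or (m % 2 == 0 and k == 1):
-- 			state = state[1:] + [1 - state[0]]
-- 		else:
-- 			state = state[1:] + [state[0]]
--
-- 		retval.append(state[-1])
--
-- 	return retval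
-- ===== SOURCE B (Python) =====
-- # B: same shift-register sequence, but each step computes (k, m) with an ordered
-- # set-dedup (dict.fromkeys) and min()/index() instead of A's quadratic membership
-- # scans and selection sort.
--
-- def _step(state):
--     n = len(state)
--     t = tuple([0] + state[1:])
--     cand = [t[j:] + t[:j] for j in [0] + list(range(n - 1, 0, -1)) if t[j] == 0]
--     order = list(dict.fromkeys(cand))
--     m = len(order)
--     k = order.index(min(order))
--     flip = (m % 2 == 1 and k == 0) or (m % 2 == 0 and k == 1)
--     bit = 1 - state[0] if flip else state[0]
--     return state[1:] + [bit], bit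
--
-- def shift_order_alg_A(s_sequence):
--     out = []
--     state = list(s_sequence)
--     while True:
--         state, bit = _step(state)
--         out.append(bit)
--         if state == s_sequence:
--             return out
-- ===== Notes on version B (the rewrite author's own statement) =====
-- stated objective: faster
-- what changed: Each step's (k, m) pair is computed by building the zero-leading rotation list once, deduplicating it with an ordered set (dict.fromkeys) and taking min()/index(), instead of A's per-candidate linear membership scans over a tagged pair list followed by an O(m^2) selection sort whose last slot is read off.
import Mathlib
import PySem

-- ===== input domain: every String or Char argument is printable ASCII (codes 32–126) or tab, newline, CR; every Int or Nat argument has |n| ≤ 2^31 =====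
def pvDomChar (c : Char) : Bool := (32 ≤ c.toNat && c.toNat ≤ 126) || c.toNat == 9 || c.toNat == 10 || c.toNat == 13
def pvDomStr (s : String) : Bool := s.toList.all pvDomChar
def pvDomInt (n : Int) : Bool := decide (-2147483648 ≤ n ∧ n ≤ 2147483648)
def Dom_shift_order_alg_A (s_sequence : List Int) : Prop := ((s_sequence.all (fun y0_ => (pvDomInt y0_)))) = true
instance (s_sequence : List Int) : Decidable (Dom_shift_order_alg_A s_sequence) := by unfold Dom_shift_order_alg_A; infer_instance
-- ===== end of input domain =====

-- B recomputes each step's (k, m) by ordered dedup (dict.fromkeys) plus min/index instead of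
-- A's quadratic membership scans and selection sort; return value only, no argument is mutated observably.

-- ===== PORT A =====

-- Shift_order_space state: (_shiftlist, _shiftnumber)
-- if_not_in: the early-return scan over range(0, len) is the negation of an 'any'
def soIfNotIn (lst : List (List Int × Int)) (a : List Int) : Bool :=
  if lst.length = 0 then true
  else !((PySem.List.pyRange 0 lst.length 1).any
          (fun i => (PySem.List.pyGetD lst i ([], 0)).1 == a))

-- apend
def soApend (st : List (List Int × Int) × Int) (a : List Int) : List (List Int × Int) × Int :=
  (st.1 ++ [(a, st.2)], st.2 + 1)

-- one outer iteration of select_sort: inner argmax scan over range(i, len), then the guarded swap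
-- (List Int values compare with Lean's lexicographic <, which is Python's list comparison on ints)
def soSortStep (resort : List (List Int × Int)) (i : Int) : List (List Int × Int) :=
  let k := (PySem.List.pyRange i resort.length 1).foldl
    (fun k j => if (PySem.List.pyGetD resort k ([], 0)).1 < (PySem.List.pyGetD resort j ([], 0)).1 then j else k) i
  if i ≠ k then
    let vi := PySem.List.pyGetD resort i ([], 0)
    let vk := PySem.List.pyGetD resort k ([], 0)
    PySem.List.pySetD (PySem.List.pySetD resort i vk) k vi
  else resort

def soSelectSort (resort : List (List Int × Int)) : List (List Int × Int) :=
  (PySem.List.pyRange 0 ((resort.length : Int) - 1) 1).foldl soSortStep resort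

def shift_order_first0 (s_sequence : List Int) : Int × Int :=
  let size := s_sequence.length
  let s := s_sequence ++ s_sequence          -- s_sequence += s_sequence (local list, not observable)
  let st := (PySem.List.pyRange (size : Int) (-1) (-1)).foldl
    (fun (st : List (List Int × Int) × Int) i =>
      if soIfNotIn st.1 (PySem.List.slice s (some i) (some (i + size))) &&
         (PySem.List.pyGetD s i 0 == 0)
      then soApend st (PySem.List.slice s (some i) (some (i + size)))
      else st) ([], 0)
  let sortedl := soSelectSort st.1
  -- get_number = _shiftlist[-1][1]; the list is nonempty whenever first0's argument starts with 0
  ((PySem.List.pyGetD sortedl (-1) ([], 0)).2, (sortedl.length : Int))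

-- one body of A's while loop: compute (k, m), shift, append
def nextA (state : List Int) : List Int :=
  let km := shift_order_first0 (0 :: PySem.List.slice state (some 1) none)
  if (PySem.Int.mod km.2 2 == 1 && km.1 == 0) || (PySem.Int.mod km.2 2 == 0 && km.1 == 1)
  then PySem.List.slice state (some 1) none ++ [1 - PySem.List.pyGetD state 0 0]
  else PySem.List.slice state (some 1) none ++ [PySem.List.pyGetD state 0 0]
  -- state[0] on empty state raises IndexError in Python: excluded by Pre_

-- A's 'while state != s_sequence' do-while loop, ported with fuel; n·2^n+1 iterations always
-- suffice for the Python loop on the inputs the tester draws (checked behaviourally, not proved);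
-- the equivalence theorem is independent of the fuel value since both ports consume the same fuel.
def loopA (s : List Int) : Nat → List Int → List Int → List Int
  | 0, _, acc => acc
  | fuel + 1, state, acc =>
    let st := nextA state
    let acc' := acc ++ [PySem.List.pyGetD st (-1) 0]     -- retval.append(state[-1])
    if st == s then acc' else loopA s fuel st acc'

def shift_order_alg_A (s_sequence : List Int) : List Int :=
  loopA s_sequence (s_sequence.length * 2 ^ s_sequence.length + 1) s_sequence []

-- ===== PORT B =====

-- _step: rotations t[j:]+t[:j] (exact for 0 ≤ j ≤ len t), ordered dedup, min/index
def nextB (state : List Int) : List Int × Int :=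
  let n := state.length
  let t : List Int := 0 :: state.drop 1                         -- tuple([0] + state[1:])
  let js : List Int := 0 :: PySem.List.pyRange ((n : Int) - 1) 0 (-1)
  let cand := (js.filter (fun j => PySem.List.pyGetD t j 0 == 0)).map
                (fun j => t.drop j.toNat ++ t.take j.toNat)
  let order := PySem.List.dedup cand
  let m : Int := (order.length : Int)
  let mn := (PySem.List.min? order (fun x => x)).getD []        -- order is never empty (j = 0)
  let k : Int := (((PySem.List.index? order mn).getD 0 : Nat) : Int)
  let flip := (PySem.Int.mod m 2 == 1 && k == 0) || (PySem.Int.mod m 2 == 0 && k == 1)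
  let bit := if flip then 1 - state.headD 0 else state.headD 0  -- state[0] on empty raises: outside Pre_
  (state.drop 1 ++ [bit], bit)

-- B's 'while True' loop, same fuel as port A (see comment there)
def loopB (s : List Int) : Nat → List Int → List Int → List Int
  | 0, _, acc => acc
  | fuel + 1, state, acc =>
    let sb := nextB state
    let acc' := acc ++ [sb.2]
    if sb.1 == s then acc' else loopB s fuel sb.1 acc'

def shift_order_alg_A_alt (s_sequence : List Int) : List Int :=
  loopB s_sequence (s_sequence.length * 2 ^ s_sequence.length + 1) s_sequence []

-- ===== PRECONDITION & SPEC =====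
-- Python A raises IndexError (state[0]) on the empty list; that is all Pre_ excludes.
def Pre_shift_order_alg_A (s_sequence : List Int) : Prop := s_sequence ≠ []
instance (s_sequence : List Int) : Decidable (Pre_shift_order_alg_A s_sequence) := by
  unfold Pre_shift_order_alg_A; infer_instance
def pvWitness_shift_order_alg_A : List Int := [0, 1]

def Spec_shift_order_alg_A (s_sequence : List Int) (out : List Int) : Prop := out = shift_order_alg_A_alt s_sequence
instance (s_sequence : List Int) (out : List Int) : Decidable (Spec_shift_order_alg_A s_sequence out) := by unfold Spec_shift_order_alg_A; infer_instance

-- ===== CLAIM (what is proved, stated in full; the proofs are below) =====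
def Claim_equal_shift_order_alg_A : Prop := ∀ (s_sequence : List Int), Dom_shift_order_alg_A s_sequence → Pre_shift_order_alg_A s_sequence → Spec_shift_order_alg_A s_sequence (shift_order_alg_A s_sequence)

-- ===== LEMMAS AND PROOFS =====

-- A's Shift_order_space pair list is its key list tagged with insertion counters 0,1,2,…
def zipIdxInt (D : List (List Int)) : List (List Int × Int) :=
  D.zipIdx.map (fun p => (p.1, (p.2 : Int)))

theorem length_zipIdxInt (D : List (List Int)) : (zipIdxInt D).length = D.length := by
  simp [zipIdxInt]

theorem mem_zipIdxInt (D : List (List Int)) (p : List Int × Int) :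
    p ∈ zipIdxInt D ↔ ∃ k, ∃ _ : k < D.length, p = (D[k], (k : Int)) := by
  unfold zipIdxInt
  rw [List.mem_map]
  constructor
  · rintro ⟨⟨x, i⟩, hq, rfl⟩
    have h := List.mem_zipIdx hq
    exact ⟨i, by omega, by simp [h.2.2]⟩
  · rintro ⟨k, hk, rfl⟩
    refine ⟨(D[k], k), ?_, rfl⟩
    exact List.mem_zipIdx_iff_getElem?.mpr (by simp)

theorem getElem_zipIdxInt (D : List (List Int)) (j : Nat) (hj : j < (zipIdxInt D).length) :
    (zipIdxInt D)[j] = (D[j]'(by rw [length_zipIdxInt] at hj; omega), (j : Int)) := by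
  simp [zipIdxInt, List.getElem_zipIdx]

theorem zipIdxInt_append_singleton (D : List (List Int)) (x : List Int) :
    zipIdxInt (D ++ [x]) = zipIdxInt D ++ [(x, (D.length : Int))] := by
  simp [zipIdxInt, List.zipIdx_append, List.zipIdx]

theorem soIfNotIn_iff (D : List (List Int)) (a : List Int) :
    soIfNotIn (zipIdxInt D) a = true ↔ a ∉ D := by
  unfold soIfNotIn
  by_cases h : (zipIdxInt D).length = 0
  · have hD : D = [] := List.length_eq_zero_iff.mp (by rw [← length_zipIdxInt]; exact h)
    simp [hD]
  · rw [if_neg h]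
    simp only [Bool.not_eq_eq_eq_not, Bool.not_true, List.any_eq_false]
    have hlen := length_zipIdxInt D
    constructor
    · intro hall hmem
      obtain ⟨j, hj, hja⟩ := List.mem_iff_getElem.mp hmem
      have hjr : ((j : Nat) : Int) ∈ PySem.List.pyRange 0 ((zipIdxInt D).length : Int) 1 :=
        PySem.List.mem_pyRange_one.mpr ⟨by omega, by omega⟩
      have hf := hall _ hjr
      rw [PySem.List.pyGetD_eq_getElem _ _ (by omega) (by omega)] at hf
      simp only [Int.toNat_natCast] at hf
      rw [getElem_zipIdxInt] at hf
      simp [hja] at hf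
    · intro hnm i hi
      obtain ⟨h0, hlt⟩ := PySem.List.mem_pyRange_one.mp hi
      rw [PySem.List.pyGetD_eq_getElem _ _ h0 (by omega)]
      rw [getElem_zipIdxInt]
      have hne : D[i.toNat]'(by omega) ≠ a := fun hxa => hnm (by rw [← hxa]; exact List.getElem_mem _)
      simpa using hne

theorem dedup_foldl_add (xs : List (List Int)) :
    PySem.List.dedup xs = xs.foldl PySem.Set.add [] := by
  simp [PySem.List.dedup_eq_ofList, PySem.Set.ofList_eq_foldl]

theorem add_of_mem (s : PySem.Set (List Int)) (x : List Int) (h : x ∈ s) :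
    PySem.Set.add s x = s := by
  simp [PySem.Set.add, PySem.Set.contains, h]

theorem add_of_not_mem (s : PySem.Set (List Int)) (x : List Int) (h : ¬ x ∈ s) :
    PySem.Set.add s x = s ++ [x] := by
  simp [PySem.Set.add, PySem.Set.contains, h]

-- A's building loop produces exactly the counter-tagged ordered dedup of the admitted slices
theorem space_fold (s : List Int) (size : Nat) :
    ∀ (I : List Int) (D : List (List Int)),
    I.foldl (fun st i =>
        if soIfNotIn st.1 (PySem.List.slice s (some i) (some (i + (size : Int)))) &&
           (PySem.List.pyGetD s i 0 == 0)
        then soApend st (PySem.List.slice s (some i) (some (i + (size : Int))))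
        else st) (zipIdxInt D, (D.length : Int)) =
      (zipIdxInt (((I.filter (fun i => PySem.List.pyGetD s i 0 == 0)).map
          (fun i => PySem.List.slice s (some i) (some (i + (size : Int))))).foldl PySem.Set.add D),
       ((((I.filter (fun i => PySem.List.pyGetD s i 0 == 0)).map
          (fun i => PySem.List.slice s (some i) (some (i + (size : Int))))).foldl PySem.Set.add D).length : Int)) := by
  intro I
  induction I with
  | nil => intro D; simp
  | cons i I ih =>
    intro D
    simp only [List.foldl_cons, List.filter_cons]
    by_cases hc : (PySem.List.pyGetD s i 0 == 0) = true
    · by_cases hm : PySem.List.slice s (some i) (some (i + (size : Int))) ∈ D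
      · have hni : soIfNotIn (zipIdxInt D) (PySem.List.slice s (some i) (some (i + (size : Int)))) = false :=
          Bool.eq_false_iff.mpr (fun ht => (soIfNotIn_iff D _).mp ht hm)
        simp only [hc, hni, if_true, Bool.and_true, Bool.false_eq_true, if_false,
          List.map_cons, List.foldl_cons, add_of_mem D _ hm]
        exact ih D
      · have hni : soIfNotIn (zipIdxInt D) (PySem.List.slice s (some i) (some (i + (size : Int)))) = true :=
          (soIfNotIn_iff D _).mpr hm
        simp only [hc, hni, if_true, Bool.and_true, List.map_cons, List.foldl_cons,
          add_of_not_mem D _ hm, soApend]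
        have hz : (zipIdxInt D ++ [(PySem.List.slice s (some i) (some (i + (size : Int))), ((D.length : Nat) : Int))])
            = zipIdxInt (D ++ [PySem.List.slice s (some i) (some (i + (size : Int)))]) :=
          (zipIdxInt_append_singleton D _).symm
        rw [hz]
        have hlen : ((D.length : Nat) : Int) + 1 = (((D ++ [PySem.List.slice s (some i) (some (i + (size : Int)))]).length : Nat) : Int) := by
          simp
        rw [hlen]
        exact ih (D ++ [PySem.List.slice s (some i) (some (i + (size : Int)))])
    · have hcf : (PySem.List.pyGetD s i 0 == 0) = false := Bool.eq_false_iff.mpr hc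
      simp only [hcf, Bool.and_false, Bool.false_eq_true, if_false]
      exact ih D

theorem mem_drop_iff (l : List (List Int × Int)) (i : Nat) (q : List Int × Int) :
    q ∈ l.drop i ↔ ∃ j, ∃ _ : j < l.length, i ≤ j ∧ l[j] = q := by
  constructor
  · intro h
    rw [List.mem_iff_getElem] at h
    obtain ⟨j, hj, hq⟩ := h
    rw [List.getElem_drop] at hq
    have hlen := hj
    rw [List.length_drop] at hlen
    exact ⟨i + j, by omega, by omega, hq⟩
  · rintro ⟨j, hj, hij, rfl⟩
    rw [List.mem_iff_getElem]
    refine ⟨j - i, by rw [List.length_drop]; omega, ?_⟩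
    rw [List.getElem_drop]
    congr 1
    omega

-- the inner argmax scan of select_sort
theorem argmax_aux (l : List (List Int × Int)) (lo : Int) (_h0 : 0 ≤ lo) :
    ∀ (c : Nat) (a acc : Int), a = (l.length : Int) - (c : Int) → lo ≤ a →
    lo ≤ acc → acc < (l.length : Int) →
    (∀ j : Int, lo ≤ j → j < a →
      ¬ ((PySem.List.pyGetD l acc ([], 0)).1 < (PySem.List.pyGetD l j ([], 0)).1)) →
    (lo ≤ (PySem.List.pyRange a (l.length : Int) 1).foldl
        (fun k j => if (PySem.List.pyGetD l k ([], 0)).1 < (PySem.List.pyGetD l j ([], 0)).1 then j else k) acc ∧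
     (PySem.List.pyRange a (l.length : Int) 1).foldl
        (fun k j => if (PySem.List.pyGetD l k ([], 0)).1 < (PySem.List.pyGetD l j ([], 0)).1 then j else k) acc < (l.length : Int) ∧
     ∀ j : Int, lo ≤ j → j < (l.length : Int) →
      ¬ ((PySem.List.pyGetD l ((PySem.List.pyRange a (l.length : Int) 1).foldl
        (fun k j => if (PySem.List.pyGetD l k ([], 0)).1 < (PySem.List.pyGetD l j ([], 0)).1 then j else k) acc) ([], 0)).1 <
         (PySem.List.pyGetD l j ([], 0)).1)) := by
  intro c
  induction c with
  | zero =>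
    intro a acc ha hla hacc1 hacc2 hinv
    rw [PySem.List.pyRange_one_eq_nil (by omega)]
    simp only [List.foldl_nil]
    exact ⟨hacc1, hacc2, fun j hj1 hj2 => hinv j hj1 (by omega)⟩
  | succ c ih =>
    intro a acc ha hla hacc1 hacc2 hinv
    have halt : a < (l.length : Int) := by
      have : ((c : Int) + 1) = ((c + 1 : Nat) : Int) := by push_cast; ring
      omega
    rw [PySem.List.pyRange_one_cons halt]
    simp only [List.foldl_cons]
    by_cases hlt : (PySem.List.pyGetD l acc ([], 0)).1 < (PySem.List.pyGetD l a ([], 0)).1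
    · rw [if_pos hlt]
      refine ih (a + 1) a (by push_cast at ha ⊢; omega) (by omega) (by omega) (by omega) ?_
      intro j hj1 hj2
      by_cases hja : j = a
      · subst hja; exact lt_irrefl _
      · intro hcon
        exact hinv j hj1 (by omega) (lt_trans hlt hcon)
    · rw [if_neg hlt]
      refine ih (a + 1) acc (by push_cast at ha ⊢; omega) (by omega) hacc1 hacc2 ?_
      intro j hj1 hj2
      by_cases hja : j = a
      · subst hja; exact hlt
      · exact hinv j hj1 (by omega)

set_option maxHeartbeats 1000000 in
-- core of step_spec, with the argmax position abstracted as K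
theorem step_core (l : List (List Int × Int)) (i : Nat) (hi : i < l.length) (K : Int)
    (hK1 : (i : Int) ≤ K) (hK2 : K < (l.length : Int))
    (hKmax : ∀ j : Int, (i : Int) ≤ j → j < (l.length : Int) →
      ¬ ((PySem.List.pyGetD l K ([], 0)).1 < (PySem.List.pyGetD l j ([], 0)).1)) :
    ∃ km : Nat, i ≤ km ∧ km < l.length ∧
      (if (i : Int) ≠ K then
         PySem.List.pySetD (PySem.List.pySetD l (i : Int) (PySem.List.pyGetD l K ([], 0))) K (PySem.List.pyGetD l (i : Int) ([], 0))
       else l).length = l.length ∧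
      (if (i : Int) ≠ K then
         PySem.List.pySetD (PySem.List.pySetD l (i : Int) (PySem.List.pyGetD l K ([], 0))) K (PySem.List.pyGetD l (i : Int) ([], 0))
       else l).take i = l.take i ∧
      PySem.List.pyGetD (if (i : Int) ≠ K then
         PySem.List.pySetD (PySem.List.pySetD l (i : Int) (PySem.List.pyGetD l K ([], 0))) K (PySem.List.pyGetD l (i : Int) ([], 0))
       else l) (i : Int) ([], 0) = PySem.List.pyGetD l (km : Int) ([], 0) ∧
      (∀ q, q ∈ (if (i : Int) ≠ K then
         PySem.List.pySetD (PySem.List.pySetD l (i : Int) (PySem.List.pyGetD l K ([], 0))) K (PySem.List.pyGetD l (i : Int) ([], 0))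
       else l).drop i ↔ q ∈ l.drop i) ∧
      (∀ q ∈ l.drop i, ¬ ((PySem.List.pyGetD l (km : Int) ([], 0)).1 < q.1)) := by
  refine ⟨K.toNat, by omega, by omega, ?_⟩
  have hKn : ((K.toNat : Nat) : Int) = K := by omega
  have hvK : PySem.List.pyGetD l K ([], 0) = l[K.toNat]'(by omega) := by
    rw [PySem.List.pyGetD_eq_getElem _ _ (by omega) (by omega)]
  have hvI : PySem.List.pyGetD l ((i : Nat) : Int) ([], 0) = l[i]'hi := by
    rw [PySem.List.pyGetD_eq_getElem _ _ (by omega) (by omega)]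
    simp only [Int.toNat_natCast]
  have hmax : ∀ q ∈ l.drop i, ¬ ((l[K.toNat]'(by omega)).1 < q.1) := by
    intro q hq
    obtain ⟨j, hj, hij, rfl⟩ := (mem_drop_iff l i q).mp hq
    have hq' := hKmax (j : Int) (by omega) (by omega)
    have e1 : PySem.List.pyGetD l ((j : Nat) : Int) ([], 0) = l[j]'hj := by
      rw [PySem.List.pyGetD_eq_getElem _ _ (by omega) (by omega)]
      simp only [Int.toNat_natCast]
    rw [e1, hvK] at hq'
    exact hq'
  rw [hKn, hvK]
  by_cases hik : (i : Int) = K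
  · rw [if_neg (not_not_intro hik)]
    have hiK : i = K.toNat := by omega
    refine ⟨rfl, rfl, ?_, fun q => Iff.rfl, hmax⟩
    rw [hvI]
    congr 1
  · rw [if_pos hik]
    have hikn : i ≠ K.toNat := by omega
    rw [hvI, PySem.List.pySetD_natCast, PySem.List.pySetD_of_nonneg _ _ (by omega)]
    refine ⟨by simp [List.length_set], ?_, ?_, ?_, hmax⟩
    · rw [List.take_set, List.take_set,
        List.set_eq_of_length_le (by simp [List.length_set]; omega),
        List.set_eq_of_length_le (by simp)]
    · rw [PySem.List.pyGetD_eq_getElem _ _ (by omega) (by simp [List.length_set]; omega)]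
      simp only [Int.toNat_natCast]
      rw [List.getElem_set_ne (by omega), List.getElem_set_self]
    · intro q
      rw [mem_drop_iff, mem_drop_iff]
      constructor
      · rintro ⟨j, hj, hij, rfl⟩
        simp only [List.length_set] at hj
        by_cases hjk : j = K.toNat
        · subst hjk
          refine ⟨i, by omega, le_refl _, ?_⟩
          rw [List.getElem_set_self]
        · by_cases hji : j = i
          · subst hji
            refine ⟨K.toNat, by omega, by omega, ?_⟩
            rw [List.getElem_set_ne (by omega), List.getElem_set_self]
          · refine ⟨j, by omega, by omega, ?_⟩
            rw [List.getElem_set_ne (by omega), List.getElem_set_ne (by omega)]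
      · rintro ⟨j, hj, hij, rfl⟩
        by_cases hjk : j = K.toNat
        · subst hjk
          refine ⟨i, by simp [List.length_set]; omega, le_refl _, ?_⟩
          rw [List.getElem_set_ne (by omega), List.getElem_set_self]
        · by_cases hji : j = i
          · subst hji
            refine ⟨K.toNat, by simp [List.length_set]; omega, by omega, ?_⟩
            rw [List.getElem_set_self]
          · refine ⟨j, by simp [List.length_set]; omega, by omega, ?_⟩
            rw [List.getElem_set_ne (by omega), List.getElem_set_ne (by omega)]

-- one outer pass of select_sort: the suffix from i keeps its members, slot i receives a maximum
theorem step_spec (l : List (List Int × Int)) (i : Nat) (hi : i < l.length) :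
    ∃ km : Nat, i ≤ km ∧ km < l.length ∧
      (soSortStep l (i : Int)).length = l.length ∧
      (soSortStep l (i : Int)).take i = l.take i ∧
      PySem.List.pyGetD (soSortStep l (i : Int)) (i : Int) ([], 0) = PySem.List.pyGetD l (km : Int) ([], 0) ∧
      (∀ q, q ∈ (soSortStep l (i : Int)).drop i ↔ q ∈ l.drop i) ∧
      (∀ q ∈ l.drop i, ¬ ((PySem.List.pyGetD l (km : Int) ([], 0)).1 < q.1)) := by
  have hA := argmax_aux l (i : Int) (Int.natCast_nonneg i) (l.length - i) (i : Int) (i : Int)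
      (by omega) le_rfl le_rfl (by exact_mod_cast hi)
      (fun j h1 h2 => absurd (h1.trans_lt h2) (lt_irrefl _))
  simp only [soSortStep]
  exact step_core l i hi _ hA.1 hA.2.1 hA.2.2

-- the whole select_sort, from position i on: members kept, last slot gets a key-minimum
theorem sort_G : ∀ (c i : Nat) (l : List (List Int × Int)), c = l.length - i → i ≤ l.length →
    ((PySem.List.pyRange (i : Int) ((l.length : Int) - 1) 1).foldl soSortStep l).length = l.length ∧
    ((PySem.List.pyRange (i : Int) ((l.length : Int) - 1) 1).foldl soSortStep l).take i = l.take i ∧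
    (∀ q, q ∈ ((PySem.List.pyRange (i : Int) ((l.length : Int) - 1) 1).foldl soSortStep l).drop i ↔ q ∈ l.drop i) ∧
    (i < l.length → ∃ p,
      ((PySem.List.pyRange (i : Int) ((l.length : Int) - 1) 1).foldl soSortStep l).getLast? = some p ∧
      p ∈ l.drop i ∧ ∀ q ∈ l.drop i, ¬ (q.1 < p.1)) := by
  intro c
  induction c with
  | zero =>
    intro i l hc hi
    rw [PySem.List.pyRange_one_eq_nil (by omega)]
    exact ⟨rfl, rfl, fun q => Iff.rfl, fun hlt => absurd hlt (by omega)⟩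
  | succ c ih =>
    intro i l hc hi
    by_cases hbase : l.length ≤ i + 1
    · rw [PySem.List.pyRange_one_eq_nil (by omega)]
      refine ⟨rfl, rfl, fun q => Iff.rfl, ?_⟩
      intro hlt
      simp only [List.foldl_nil]
      have hne : l ≠ [] := by intro h; subst h; simp at hlt
      have hieq : i = l.length - 1 := by omega
      refine ⟨l.getLast hne, List.getLast?_eq_some_getLast hne, ?_, ?_⟩
      · rw [hieq, List.drop_length_sub_one hne]
        simp
      · intro q hq
        rw [hieq, List.drop_length_sub_one hne] at hq
        have hqe : q = l.getLast hne := by simpa using hq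
        rw [hqe]
        exact lt_irrefl _
    · have hilt : i < l.length := by omega
      rw [PySem.List.pyRange_one_cons (by omega)]
      simp only [List.foldl_cons]
      obtain ⟨km, hkm1, hkm2, hlen, htake, hgeti, hmem, hmax⟩ := step_spec l i hilt
      set l' := soSortStep l (i : Int) with hl'
      have hcast : ((i + 1 : Nat) : Int) = (i : Int) + 1 := by push_cast; ring
      have hIH := ih (i + 1) l' (by omega) (by omega)
      rw [hcast, hlen] at hIH
      obtain ⟨ihlen, ihtake, ihmem, ihlast⟩ := hIH
      set r := (PySem.List.pyRange ((i : Int) + 1) ((l.length : Int) - 1) 1).foldl soSortStep l' with hr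
      have hrlen : r.length = l.length := ihlen
      have hri : r[i]'(by omega) = l'[i]'(by omega) := by
        calc r[i]'(by omega) = (r.take (i + 1))[i]'(by rw [List.length_take]; omega) :=
              List.getElem_take.symm
          _ = (l'.take (i + 1))[i]'(by rw [List.length_take]; omega) := by simp only [ihtake]
          _ = l'[i]'(by omega) := List.getElem_take
      have hdr : r.drop i = r[i]'(by omega) :: r.drop (i + 1) := List.drop_eq_getElem_cons (by omega)
      have hdl' : l'.drop i = l'[i]'(by omega) :: l'.drop (i + 1) := List.drop_eq_getElem_cons (by omega)
      have hmemr : ∀ q, q ∈ r.drop i ↔ q ∈ l.drop i := by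
        intro q
        rw [hdr, List.mem_cons, hri, ihmem q, ← List.mem_cons, ← hdl', hmem q]
      refine ⟨hrlen, ?_, hmemr, ?_⟩
      · calc r.take i = (r.take (i + 1)).take i := by rw [List.take_take, min_eq_left (by omega)]
          _ = (l'.take (i + 1)).take i := by rw [ihtake]
          _ = l'.take i := by rw [List.take_take, min_eq_left (by omega)]
          _ = l.take i := htake
      · intro _
        obtain ⟨p, hplast, hpmem, hpmin⟩ := ihlast (by omega)
        have hpl : p ∈ l.drop i := by
          refine (hmem p).mp ?_
          rw [hdl']
          exact List.mem_cons_of_mem _ hpmem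
        refine ⟨p, hplast, hpl, ?_⟩
        intro q hq
        have hq' : q ∈ l'.drop i := (hmem q).mpr hq
        rw [hdl', List.mem_cons] at hq'
        rcases hq' with hq1 | hq2
        · rw [hq1]
          have e : l'[i]'(by omega) = PySem.List.pyGetD l (km : Int) ([], 0) := by
            rw [← hgeti, PySem.List.pyGetD_eq_getElem _ _ (by omega) (by omega)]
            simp only [Int.toNat_natCast]
          rw [e]
          exact hmax p hpl
        · exact hpmin q hq2

theorem selectSort_spec (l : List (List Int × Int)) (h : l ≠ []) :
    (soSelectSort l).length = l.length ∧
    ∃ p, (soSelectSort l).getLast? = some p ∧ p ∈ l ∧ ∀ q ∈ l, ¬ (q.1 < p.1) := by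
  have hpos : 0 < l.length := by
    have : l.length ≠ 0 := fun he => h (List.length_eq_zero_iff.mp he)
    omega
  have hG := sort_G l.length 0 l (by omega) (by omega)
  simp only [Nat.cast_zero, List.drop_zero, List.take_zero] at hG
  obtain ⟨h1, _, _, h4⟩ := hG
  obtain ⟨p, hp1, hp2, hp3⟩ := h4 hpos
  exact ⟨h1, p, hp1, hp2, hp3⟩

-- first-minimum property of Python min(), for the list-of-rotations instance used here
theorem minfold_aux (mn : List Int) :
    ∀ (xs : List (List Int)) (m0 : List Int),
    PySem.List.min? (m0 :: xs) (fun x => x) = some mn →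
    (∀ y ∈ xs, ¬ (y < mn)) ∧ ¬ (m0 < mn) := by
  intro xs
  induction xs with
  | nil =>
    intro m0 h
    have he : m0 = mn := by simpa [PySem.List.min?] using h
    subst he
    exact ⟨by simp, lt_irrefl _⟩
  | cons x t ih =>
    intro m0 h
    by_cases hlt : x < m0
    · have h2 : PySem.List.min? (x :: t) (fun x => x) = some mn := by
        simp only [PySem.List.min?, List.foldl_cons] at h ⊢
        simpa [if_pos hlt] using h
      obtain ⟨hall, hx⟩ := ih x h2
      refine ⟨?_, ?_⟩
      · intro y hy
        rcases List.mem_cons.mp hy with rfl | hy'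
        · exact hx
        · exact hall y hy'
      · intro hm0
        exact hx (lt_trans hlt hm0)
    · have h2 : PySem.List.min? (m0 :: t) (fun x => x) = some mn := by
        simp only [PySem.List.min?, List.foldl_cons] at h ⊢
        simpa [if_neg hlt] using h
      obtain ⟨hall, hm0⟩ := ih m0 h2
      refine ⟨?_, hm0⟩
      intro y hy
      rcases List.mem_cons.mp hy with rfl | hy'
      · intro hymn
        rcases lt_trichotomy y m0 with h1 | h1 | h1
        · exact hlt h1
        · exact hm0 (h1 ▸ hymn)
        · exact hm0 (lt_trans h1 hymn)
      · exact hall y hy'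

theorem min?_not_lt (xs : List (List Int)) (mn : List Int)
    (h : PySem.List.min? xs (fun x => x) = some mn) : ∀ y ∈ xs, ¬ (y < mn) := by
  cases xs with
  | nil => simp [PySem.List.min?] at h
  | cons x t =>
    obtain ⟨hall, hx⟩ := minfold_aux mn t x h
    intro y hy
    rcases List.mem_cons.mp hy with rfl | hy'
    · exact hx
    · exact hall y hy'

-- B's min/index of the dedup list names exactly the counter select_sort leaves in the last slot
theorem order_min_index (R : List (List Int)) (hnd : R.Nodup)
    (p : List Int × Int) (hp : p ∈ zipIdxInt R)
    (hmin : ∀ q ∈ zipIdxInt R, ¬ (q.1 < p.1)) :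
    ((((PySem.List.index? R ((PySem.List.min? R (fun x => x)).getD [])).getD 0 : Nat) : Int)) = p.2 := by
  obtain ⟨k, hk, rfl⟩ := (mem_zipIdxInt R p).mp hp
  have hRne : R ≠ [] := by intro he; subst he; simp at hk
  obtain ⟨mn, hmn⟩ : ∃ mn, PySem.List.min? R (fun x => x) = some mn := by
    cases hmq : PySem.List.min? R (fun x => x) with
    | none => exact absurd ((PySem.List.min?_eq_none_iff R _).mp hmq) hRne
    | some m => exact ⟨m, rfl⟩
  have hmnmem := PySem.List.min?_mem hmn
  have hmnmin := min?_not_lt R mn hmn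
  have hlb : ∀ y ∈ R, ¬ (y < R[k]) := by
    intro y hy
    obtain ⟨j, hj, hyj⟩ := List.mem_iff_getElem.mp hy
    have hzj : (R[j], (j : Int)) ∈ zipIdxInt R := (mem_zipIdxInt R _).mpr ⟨j, hj, rfl⟩
    have hq := hmin _ hzj
    rw [← hyj]
    simpa using hq
  have heq : mn = R[k] := by
    rcases lt_trichotomy mn (R[k]'hk) with h1 | h1 | h1
    · exact absurd h1 (hlb mn hmnmem)
    · exact h1
    · exact absurd h1 (hmnmin _ (List.getElem_mem hk))
  rw [hmn]
  simp only [Option.getD_some]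
  have hidx : PySem.List.index? R mn = some k := by
    rw [PySem.List.index?_eq_some_iff R mn k]
    refine ⟨R.take k, R.drop (k + 1), ?_, ?_, ?_⟩
    · rw [heq, List.getElem_cons_drop hk, List.take_append_drop]
    · rw [List.length_take]; omega
    · rw [heq]
      intro hmem'
      obtain ⟨j, hj, hje⟩ := List.mem_iff_getElem.mp hmem'
      rw [List.getElem_take] at hje
      have hjlen : j < k := by rw [List.length_take] at hj; omega
      exact absurd (hnd.getElem_inj_iff.mp hje) (by omega)
  rw [hidx]
  simp

-- the candidate slices of A are B's rotations: leading rotation, the middle block, a trailing duplicate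
theorem candA_eq (u : List Int) :
    (((PySem.List.pyRange (((0 :: u).length : Int)) (-1) (-1)).filter
        (fun i => PySem.List.pyGetD ((0 :: u) ++ (0 :: u)) i 0 == 0)).map
        (fun i => PySem.List.slice ((0 :: u) ++ (0 :: u)) (some i) (some (i + (((0 :: u).length : Nat) : Int))))) =
      ((0 :: u) :: (((PySem.List.pyRange (((0 :: u).length : Int) - 1) 0 (-1)).filter
          (fun j => PySem.List.pyGetD (0 :: u) j 0 == 0)).map
          (fun j => (0 :: u).drop j.toNat ++ (0 :: u).take j.toNat))) ++ [0 :: u] := by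
  have hrev1 : PySem.List.pyRange (((0 :: u).length : Int) - 1) (-1) (-1)
      = PySem.List.pyRange (((0 :: u).length : Int) - 1) 0 (-1) ++ [0] := by
    rw [PySem.List.pyRange_neg_one_eq_reverse, PySem.List.pyRange_neg_one_eq_reverse]
    have e1 : (-1 : Int) + 1 = 0 := by ring
    have e2 : ((0 :: u).length : Int) - 1 + 1 = ((0 :: u).length : Int) := by ring
    have e3 : (0 : Int) + 1 = 1 := by ring
    rw [e1, e2, e3]
    rw [PySem.List.pyRange_one_append 0 1 ((0 :: u).length : Int) (by omega)
      (by simp only [List.length_cons]; omega)]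
    rw [show PySem.List.pyRange (0 : Int) 1 = [0] by decide]
    rw [List.reverse_append]
    simp
  have hrange : PySem.List.pyRange (((0 :: u).length : Int)) (-1) (-1)
      = ((0 :: u).length : Int) :: (PySem.List.pyRange (((0 :: u).length : Int) - 1) 0 (-1) ++ [0]) := by
    rw [PySem.List.pyRange_neg_one_cons (by omega)]
    rw [hrev1]
  rw [hrange]
  have hheadc : (PySem.List.pyGetD ((0 :: u) ++ (0 :: u)) (((0 :: u).length : Int)) 0 == 0) = true := by
    rw [PySem.List.pyGetD_eq_getElem _ _ (by omega) (by simp only [List.length_append, List.length_cons]; omega)]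
    simp only [Int.toNat_natCast]
    rw [List.getElem_append_right (by omega)]
    simp
  have hheads : PySem.List.slice ((0 :: u) ++ (0 :: u)) (some (((0 :: u).length : Int)))
      (some ((((0 :: u).length : Int)) + (((0 :: u).length : Nat) : Int))) = (0 :: u) := by
    rw [PySem.List.slice_natCast_add]
    rw [List.drop_left, List.take_length]
  have hzc : (PySem.List.pyGetD ((0 :: u) ++ (0 :: u)) 0 0 == 0) = true := by
    rw [List.cons_append, PySem.List.pyGetD_zero_cons]
    simp
  have hzs : PySem.List.slice ((0 :: u) ++ (0 :: u)) (some 0)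
      (some ((0 : Int) + (((0 :: u).length : Nat) : Int))) = (0 :: u) := by
    simp only [PySem.List.slice_zero_start]
    rw [show ((0 : Int) + (((0 :: u).length : Nat) : Int)) = (((0 :: u).length : Nat) : Int) by ring]
    rw [PySem.List.slice_to_natCast]
    exact List.take_left
  have hfil : (PySem.List.pyRange (((0 :: u).length : Int) - 1) 0 (-1)).filter
        (fun i => PySem.List.pyGetD ((0 :: u) ++ (0 :: u)) i 0 == 0)
      = (PySem.List.pyRange (((0 :: u).length : Int) - 1) 0 (-1)).filter
        (fun j => PySem.List.pyGetD (0 :: u) j 0 == 0) := by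
    apply List.filter_congr
    intro x hx
    obtain ⟨h1, h2⟩ := PySem.List.mem_pyRange_neg_one.mp hx
    have hxlt : x < ((0 :: u).length : Int) := by omega
    rw [PySem.List.pyGetD_eq_getElem _ _ (by omega) (by simp only [List.length_append]; omega),
        PySem.List.pyGetD_eq_getElem _ _ (by omega) (by omega)]
    rw [List.getElem_append_left (by omega)]
  have hmapc : ∀ x ∈ (PySem.List.pyRange (((0 :: u).length : Int) - 1) 0 (-1)).filter
        (fun j => PySem.List.pyGetD (0 :: u) j 0 == 0),
      PySem.List.slice ((0 :: u) ++ (0 :: u)) (some x) (some (x + (((0 :: u).length : Nat) : Int)))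
        = (0 :: u).drop x.toNat ++ (0 :: u).take x.toNat := by
    intro x hx
    have hxr := (List.mem_filter.mp hx).1
    obtain ⟨h1, h2⟩ := PySem.List.mem_pyRange_neg_one.mp hxr
    rw [PySem.List.slice_toNat _ (by omega) (by omega)]
    have e1 : (x + (((0 :: u).length : Nat) : Int)).toNat - x.toNat = (0 :: u).length := by omega
    rw [e1, List.drop_append]
    have e2 : x.toNat - (0 :: u).length = 0 := by omega
    rw [e2, List.drop_zero, List.take_append]
    have e3 : (0 :: u).length - ((0 :: u).drop x.toNat).length = x.toNat := by
      rw [List.length_drop]; omega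
    rw [e3]
    congr 1
    exact List.take_of_length_le (by rw [List.length_drop]; omega)
  rw [List.filter_cons, hheadc]
  simp only [if_true]
  rw [List.filter_append, hfil, List.filter_cons, hzc]
  simp only [if_true, List.filter_nil]
  rw [List.map_cons, List.map_append, List.map_cons, List.map_nil]
  rw [hheads, hzs, List.map_congr_left hmapc]
  simp

theorem dedup_snoc_mem (xs : List (List Int)) (x : List Int) (h : x ∈ xs) :
    PySem.List.dedup (xs ++ [x]) = PySem.List.dedup xs := by
  rw [dedup_foldl_add, dedup_foldl_add, List.foldl_append]
  simp only [List.foldl_cons, List.foldl_nil]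
  rw [add_of_mem]
  rw [← dedup_foldl_add]
  exact (PySem.List.mem_dedup xs x).mpr h

-- B's per-step dedup'd rotation list, as a name for the statements below
def rotOrder (u : List Int) : List (List Int) :=
  PySem.List.dedup ((((0 : Int) :: PySem.List.pyRange (((0 :: u).length : Int) - 1) 0 (-1)).filter
      (fun j => PySem.List.pyGetD (0 :: u) j 0 == 0)).map
      (fun j => (0 :: u).drop j.toNat ++ (0 :: u).take j.toNat))

-- the per-step (k, m) of A equals B's
theorem first0_char (u : List Int) :
    shift_order_first0 (0 :: u) =
      ((((PySem.List.index? (rotOrder u)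
            ((PySem.List.min? (rotOrder u) (fun x => x)).getD [])).getD 0 : Nat) : Int),
       ((rotOrder u).length : Int)) := by
  simp only [shift_order_first0]
  rw [show (([], (0 : Int)) : List (List Int × Int) × Int)
        = (zipIdxInt ([] : List (List Int)), ((List.length ([] : List (List Int))) : Int)) from rfl]
  rw [space_fold ((0 :: u) ++ (0 :: u)) ((0 :: u).length)]
  rw [candA_eq u]
  rw [← dedup_foldl_add]
  rw [dedup_snoc_mem _ _ (List.mem_cons_self ..)]
  have hrot : rotOrder u = PySem.List.dedup ((0 :: u) ::
      ((PySem.List.pyRange (((0 :: u).length : Int) - 1) 0 (-1)).filter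
        (fun j => PySem.List.pyGetD (0 :: u) j 0 == 0)).map
        (fun j => (0 :: u).drop j.toNat ++ (0 :: u).take j.toNat)) := by
    unfold rotOrder
    rw [List.filter_cons]
    simp only [PySem.List.pyGetD_zero_cons, beq_self_eq_true, if_true, List.map_cons]
    simp
  rw [← hrot]
  have hRne : rotOrder u ≠ [] := by
    intro he
    have hm : (0 :: u) ∈ rotOrder u := by
      rw [hrot]
      exact (PySem.List.mem_dedup _ _).mpr (List.mem_cons_self ..)
    rw [he] at hm
    simp at hm
  have hzlen : (zipIdxInt (rotOrder u)).length = (rotOrder u).length := length_zipIdxInt _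
  have hzne : zipIdxInt (rotOrder u) ≠ [] := by
    intro he
    apply hRne
    have hl := congrArg List.length he
    rw [hzlen] at hl
    exact List.length_eq_zero_iff.mp (by simpa using hl)
  obtain ⟨hslen, p, hplast, hpmem, hpmin⟩ := selectSort_spec (zipIdxInt (rotOrder u)) hzne
  have hsne : soSelectSort (zipIdxInt (rotOrder u)) ≠ [] := by
    intro he
    rw [he] at hplast
    simp at hplast
  rw [PySem.List.pyGetD_neg_one _ _ hsne]
  have hlp : (soSelectSort (zipIdxInt (rotOrder u))).getLast hsne = p := by
    have h2 := List.getLast?_eq_some_getLast hsne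
    rw [hplast] at h2
    exact (Option.some.inj h2).symm
  rw [hlp]
  have hnd : (rotOrder u).Nodup := by
    unfold rotOrder
    exact PySem.List.nodup_dedup _
  have hk := order_min_index (rotOrder u) hnd p hpmem hpmin
  exact Prod.ext hk.symm (by rw [hslen, hzlen])

theorem nextB_last (state : List Int) :
    PySem.List.pyGetD (nextB state).1 (-1) 0 = (nextB state).2 := by
  unfold nextB
  exact PySem.List.pyGetD_neg_one_append_singleton _ _ _

theorem next_eq (state : List Int) : nextA state = (nextB state).1 := by
  cases state with
  | nil => decide
  | cons h tl =>
    simp only [nextA, nextB]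
    rw [PySem.List.slice_from_one]
    simp only [List.tail_cons, List.drop_succ_cons, List.drop_zero, List.length_cons,
      List.headD_cons, PySem.List.pyGetD_zero_cons]
    rw [first0_char tl]
    simp only [rotOrder, List.length_cons]
    split_ifs <;> simp

theorem loop_eq (s : List Int) (fuel : Nat) : ∀ (state acc : List Int),
    loopA s fuel state acc = loopB s fuel state acc := by
  induction fuel with
  | zero => intro state acc; rfl
  | succ f ih =>
    intro state acc
    show (let st := nextA state;
          let acc' := acc ++ [PySem.List.pyGetD st (-1) 0];
          if st == s then acc' else loopA s f st acc') =
         (let sb := nextB state;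
          let acc' := acc ++ [sb.2];
          if sb.1 == s then acc' else loopB s f sb.1 acc')
    simp only [next_eq state, nextB_last state]
    by_cases h : (nextB state).1 == s
    · simp [h]
    · simp only [h, Bool.false_eq_true, ite_false]
      exact ih _ _

-- ===== VERDICT (by name: the statement is the Claim_ definition above) =====
theorem shift_order_alg_A_spec : Claim_equal_shift_order_alg_A := by
  intro s _ _
  unfold Spec_shift_order_alg_A shift_order_alg_A shift_order_alg_A_alt
  exact loop_eq s _ s []
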